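-- pv_equiv track=rewrite | github.com/grapesmoker/nba | Player.py | check_time_consistency
-- ===== SOURCE A (Python) =====
-- def check_time_consistency(times_subbed_in, times_subbed_out):
--
--     consistent = True
--
--     if len(times_subbed_in) == len(times_subbed_out) or len(times_subbed_in) == len(times_subbed_out) + 1:
--         correct = True
--         for to in times_subbed_out:
--             for i, ti in enumerate(times_subbed_in[:-1]):
--                 ti_next = times_subbed_in[i + 1]
--                 if not (to < ti and to >= ti_next):
--                     correct = False
--
--         consistent = correct
--     else:
--         consistent = False
--
--     return consistent
-- ===== SOURCE B (Python) =====
-- def check_time_consistency(times_subbed_in, times_subbed_out):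
--     n = len(times_subbed_in)
--     m = len(times_subbed_out)
--     if n != m and n != m + 1:
--         return False
--     if n < 2 or m == 0:
--         return True
--     lo = min(times_subbed_in[:-1])
--     hi = max(times_subbed_in[1:])
--     return all(hi <= t < lo for t in times_subbed_out)
-- ===== Notes on version B (the rewrite author's own statement) =====
-- stated objective: faster
-- what changed: Instead of re-scanning all adjacent pairs of times_subbed_in for every sub-out time, B precomputes min(times_subbed_in[:-1]) and max(times_subbed_in[1:]) once and then checks each sub-out time against those two bounds in a single pass.
import Mathlib
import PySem

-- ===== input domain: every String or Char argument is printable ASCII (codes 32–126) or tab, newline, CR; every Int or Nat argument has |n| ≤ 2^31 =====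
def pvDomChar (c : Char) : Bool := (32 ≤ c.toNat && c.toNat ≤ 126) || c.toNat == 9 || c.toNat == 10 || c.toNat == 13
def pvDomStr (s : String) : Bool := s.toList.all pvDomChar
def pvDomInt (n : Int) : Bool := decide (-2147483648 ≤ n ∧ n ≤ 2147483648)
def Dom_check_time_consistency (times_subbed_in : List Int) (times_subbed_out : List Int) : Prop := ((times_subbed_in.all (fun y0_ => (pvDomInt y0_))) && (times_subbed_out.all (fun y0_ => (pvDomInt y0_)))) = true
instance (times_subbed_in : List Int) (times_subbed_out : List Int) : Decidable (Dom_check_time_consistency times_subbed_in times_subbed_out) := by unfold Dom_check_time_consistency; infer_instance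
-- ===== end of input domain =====

-- B replaces A's O(n*m) rescan of all adjacent sub-in pairs per sub-out time with precomputed
-- min(in[:-1]) / max(in[1:]) bounds and one pass over the sub-out times (measured faster).

-- ===== PORT A =====
-- Port of A: nested loops over times_subbed_out and enumerate(times_subbed_in[:-1]) with a flag.
-- times_subbed_in[i+1] is always in range here (i < len-1), so pyGetD is exact for A's indexing.
def check_time_consistency (times_subbed_in : List Int) (times_subbed_out : List Int) : Bool :=
  if times_subbed_in.length = times_subbed_out.length ∨
     times_subbed_in.length = times_subbed_out.length + 1 then
    let correct := times_subbed_out.foldl (fun correct to_ =>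
      (PySem.List.enumerate (PySem.List.slice times_subbed_in none (some (-1)))).foldl
        (fun correct p =>
          let ti_next := PySem.List.pyGetD times_subbed_in (p.1 + 1) 0
          if ¬ (to_ < p.2 ∧ to_ ≥ ti_next) then false else correct)
        correct) true
    correct
  else false

-- ===== PORT B =====
-- Port of B: min of in[:-1] and max of in[1:] computed once, single pass over times_subbed_out.
def check_time_consistency_alt (times_subbed_in : List Int) (times_subbed_out : List Int) : Bool :=
  let n := times_subbed_in.length
  let m := times_subbed_out.length
  if n ≠ m ∧ n ≠ m + 1 then false
  else if n < 2 ∨ m = 0 then true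
  else
    let lo := (PySem.List.min? (PySem.List.slice times_subbed_in none (some (-1))) (fun x => x)).getD 0
    let hi := (PySem.List.max? (PySem.List.slice times_subbed_in (some 1) none) (fun x => x)).getD 0
    times_subbed_out.all (fun t => hi ≤ t && t < lo)

-- ===== PRECONDITION & SPEC =====
def Spec_check_time_consistency (times_subbed_in : List Int) (times_subbed_out : List Int) (out : Bool) : Prop := out = check_time_consistency_alt times_subbed_in times_subbed_out
instance (times_subbed_in : List Int) (times_subbed_out : List Int) (out : Bool) : Decidable (Spec_check_time_consistency times_subbed_in times_subbed_out out) := by unfold Spec_check_time_consistency; infer_instance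

-- ===== CLAIM (what is proved, stated in full; the proofs are below) =====
def Claim_equal_check_time_consistency : Prop := ∀ (times_subbed_in : List Int) (times_subbed_out : List Int), Dom_check_time_consistency times_subbed_in times_subbed_out → Spec_check_time_consistency times_subbed_in times_subbed_out (check_time_consistency times_subbed_in times_subbed_out)

-- ===== LEMMAS AND PROOFS =====


theorem pv_inner_fold (tin : List Int) (t : Int) (E : List (Int × Int)) :
    ∀ c : Bool, E.foldl (fun correct p =>
        let ti_next := PySem.List.pyGetD tin (p.1 + 1) 0
        if ¬ (t < p.2 ∧ t ≥ ti_next) then false else correct) c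
      = (c && E.all (fun p => decide (t < p.2 ∧ t ≥ PySem.List.pyGetD tin (p.1 + 1) 0))) := by
  induction E with
  | nil => simp
  | cons p E ih =>
    intro c
    simp only [List.foldl_cons, List.all_cons, ih]
    by_cases h : t < p.2 ∧ t ≥ PySem.List.pyGetD tin (p.1 + 1) 0 <;> simp [h]

theorem pv_outer_fold (tin : List Int) (E : List (Int × Int)) (tout : List Int) :
    ∀ c : Bool, tout.foldl (fun correct to_ =>
        E.foldl (fun correct p =>
          let ti_next := PySem.List.pyGetD tin (p.1 + 1) 0
          if ¬ (to_ < p.2 ∧ to_ ≥ ti_next) then false else correct) correct) c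
      = (c && tout.all (fun t => E.all (fun p => decide (t < p.2 ∧ t ≥ PySem.List.pyGetD tin (p.1 + 1) 0)))) := by
  induction tout with
  | nil => simp
  | cons t tout ih =>
    intro c
    rw [List.foldl_cons, ih, pv_inner_fold, List.all_cons]
    cases c
    · simp
    · simp

theorem pv_enum_all (f : Int × Int → Bool) :
    ∀ (xs : List Int) (s : Int),
      (PySem.List.enumerate xs s).all f = true ↔ ∀ k : Nat, (h : k < xs.length) → f (s + k, xs[k]) = true := by
  intro xs
  induction xs with
  | nil => simp [PySem.List.enumerate_nil]
  | cons x xs ih =>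
    intro s
    rw [PySem.List.enumerate_cons]
    simp only [List.all_cons, Bool.and_eq_true, ih]
    constructor
    · rintro ⟨h0, h1⟩ k hk
      cases k with
      | zero => simpa using h0
      | succ k =>
        have := h1 k (by simpa using Nat.lt_of_succ_lt_succ hk)
        simpa [add_assoc, add_comm, add_left_comm] using this
    · intro h
      refine ⟨by simpa using h 0 (by simp), fun k hk => ?_⟩
      have := h (k+1) (by simpa using Nat.succ_lt_succ hk)
      push_cast at this ⊢
      convert this using 3; ring_nf

theorem pv_bounds (tin : List Int) (h2 : 2 ≤ tin.length) (t : Int)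
    (lo hi : Int)
    (hlo : PySem.List.min? tin.dropLast (fun x => x) = some lo)
    (hhi : PySem.List.max? tin.tail (fun x => x) = some hi) :
    ((∀ k : Nat, (h : k < tin.dropLast.length) → t < tin.dropLast[k] ∧ tin[k+1]'(by simp at h ⊢; omega) ≤ t)
      ↔ (hi ≤ t ∧ t < lo)) := by
  have hlomem := PySem.List.min?_mem hlo
  have hlomin := PySem.List.min?_isMin hlo
  have hhimem := PySem.List.max?_mem hhi
  have hhimax := PySem.List.max?_isMax hhi
  constructor
  · intro h
    obtain ⟨j, hj, hjv⟩ := List.mem_iff_getElem.mp hlomem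
    obtain ⟨i, hi', hiv⟩ := List.mem_iff_getElem.mp hhimem
    have hit := h i (by simp at hi' ⊢; omega)
    have hjt := h j hj
    constructor
    · rw [← hiv]
      have : tin.tail[i] = tin[i+1]'(by simp at hi' ⊢; omega) := by
        simp [List.getElem_tail]
      rw [this]; exact hit.2
    · rw [← hjv]; exact hjt.1
  · rintro ⟨h1, h2'⟩ k hk
    constructor
    · exact lt_of_lt_of_le h2' (hlomin _ (List.getElem_mem hk))
    · refine le_trans ?_ h1
      have hk' : k < tin.tail.length := by simp at hk ⊢; omega
      have : tin[k+1]'(by simp at hk ⊢; omega) = tin.tail[k] := by simp [List.getElem_tail]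
      rw [this]
      exact hhimax _ (List.getElem_mem hk')

theorem pv_main (tin tout : List Int) :
    check_time_consistency tin tout = check_time_consistency_alt tin tout := by
  unfold check_time_consistency check_time_consistency_alt
  rw [PySem.List.slice_to_neg_one, PySem.List.slice_from_one]
  by_cases hlen : tin.length = tout.length ∨ tin.length = tout.length + 1
  · rw [if_pos hlen, if_neg (by tauto)]
    rw [pv_outer_fold, Bool.true_and]
    by_cases hsmall : tin.length < 2 ∨ tout.length = 0
    · rw [if_pos hsmall]
      rcases hsmall with hs | hs
      · have hE : tin.dropLast = [] := by
          cases tin with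
          | nil => rfl
          | cons x xs =>
            cases xs with
            | nil => rfl
            | cons y ys => simp at hs
        simp [hE, PySem.List.enumerate_nil]
      · rw [List.length_eq_zero_iff.mp hs]; rfl
    · rw [if_neg hsmall]
      rw [not_or] at hsmall
      have h2 : 2 ≤ tin.length := by omega
      have hdne : tin.dropLast ≠ [] := by
        intro h; have := congrArg List.length h; simp at this; omega
      have htne : tin.tail ≠ [] := by
        intro h; have := congrArg List.length h; simp at this; omega
      obtain ⟨lo, hlo⟩ : ∃ lo, PySem.List.min? tin.dropLast (fun x => x) = some lo := by
        cases h : PySem.List.min? tin.dropLast (fun x => x) with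
        | none => exact absurd ((PySem.List.min?_eq_none_iff _ _).mp h) hdne
        | some v => exact ⟨v, rfl⟩
      obtain ⟨hi, hhi⟩ : ∃ hi, PySem.List.max? tin.tail (fun x => x) = some hi := by
        cases h : PySem.List.max? tin.tail (fun x => x) with
        | none => exact absurd ((PySem.List.max?_eq_none_iff _ _).mp h) htne
        | some v => exact ⟨v, rfl⟩
      rw [hlo, hhi]
      simp only [Option.getD_some]
      refine congrArg tout.all ?_
      funext t
      have hb := pv_bounds tin h2 t lo hi hlo hhi
      have hg : ∀ (k : Nat) (hk : k < tin.dropLast.length),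
          PySem.List.pyGetD tin ((0:Int) + (k:Int) + 1) 0 = tin[k+1]'(by simp at hk ⊢; omega) := by
        intro k hk
        have h1 := PySem.List.pyGetD_natCast tin (k+1) 0
        push_cast at h1
        rw [(by ring : (0:Int) + (k:Int) + 1 = (k:Int)+1), h1,
            List.getD_eq_getElem?_getD, List.getElem?_eq_getElem (by simp at hk ⊢; omega)]
        rfl
      rw [Bool.eq_iff_iff, pv_enum_all]
      simp only [decide_eq_true_eq, Bool.and_eq_true]
      rw [← hb]
      constructor
      · intro h k hk
        have := h k hk
        rw [hg k hk] at this
        exact this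
      · intro h k hk
        have := h k hk
        rw [hg k hk]
        exact this
  · rw [if_neg hlen, if_pos (by tauto)]

-- ===== VERDICT (by name: the statement is the Claim_ definition above) =====
theorem check_time_consistency_spec : Claim_equal_check_time_consistency := by
  intro tin tout _
  unfold Spec_check_time_consistency
  exact pv_main tin tout
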